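-- pv_equiv track=rewrite | github.com/chinski99/zaprzyjaznij | chapter 16/infinite_tree.py | infinite_tree
-- ===== SOURCE A (Python) =====
-- def infinite_tree(a, b):
--     r = 0
--     while a != b:
--         if a > b:
--             a //= 2
--         else:
--             b //= 2
--         r += 1
--     return r
-- ===== SOURCE B (Python) =====
-- def infinite_tree(a, b):
--     la = a.bit_length()
--     lb = b.bit_length()
--     r = 0
--     if la > lb:
--         a >>= la - lb
--         r += la - lb
--     elif lb > la:
--         b >>= lb - la
--         r += lb - la
--     while a != b:
--         a >>= 1
--         b >>= 1
--         r += 2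
--     return r
-- ===== Notes on version B (the rewrite author's own statement) =====
-- stated objective: alternative
-- what changed: B computes both nodes' depths via bit_length, lifts the deeper node to equal depth in one batch shift, then ascends both nodes simultaneously, instead of A's greedy one-step-at-a-time loop that repeatedly halves whichever node is larger.
import Mathlib
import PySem

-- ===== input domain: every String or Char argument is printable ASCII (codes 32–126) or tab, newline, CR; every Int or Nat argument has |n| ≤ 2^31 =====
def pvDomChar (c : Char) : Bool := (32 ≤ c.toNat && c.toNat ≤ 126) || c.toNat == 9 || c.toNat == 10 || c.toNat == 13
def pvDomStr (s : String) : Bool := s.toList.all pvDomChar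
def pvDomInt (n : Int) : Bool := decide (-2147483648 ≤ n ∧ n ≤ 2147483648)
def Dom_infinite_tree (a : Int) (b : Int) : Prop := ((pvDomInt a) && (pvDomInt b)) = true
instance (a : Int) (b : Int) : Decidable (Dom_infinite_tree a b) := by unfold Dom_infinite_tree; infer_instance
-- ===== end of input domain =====

-- B replaces A's greedy one-step loop (halve the larger node) by: compute both depths
-- with bit_length, lift the deeper node in one batch shift, then ascend both together.
-- Objective: alternative decomposition, same asymptotic cost.

-- ===== PORT A =====
-- A's while loop: halve whichever of a, b is larger (Python // 2 = PySem.Int.floordiv)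
-- until they meet, counting steps.  The fuel argument is only a totality guard: whenever
-- the Python loop terminates, each iteration halves a value whose bit_length is positive,
-- so bitLength a + bitLength b + 1 iterations always suffice; where the Python loop runs
-- forever (a ≠ b with a negative argument, excluded by Pre_) the fuel runs out.
def loopAF : Nat → Int → Int → Int → Int
  | 0, _, _, r => r
  | f + 1, a, b, r =>
    if a = b then r
    else if b < a then loopAF f (PySem.Int.floordiv a 2) b (r + 1)
    else loopAF f a (PySem.Int.floordiv b 2) (r + 1)

def infinite_tree (a : Int) (b : Int) : Int :=
  loopAF (PySem.Int.bitLength a + PySem.Int.bitLength b + 1) a b 0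

-- ===== PORT B =====
-- Source B's final while loop: both nodes are shifted right simultaneously, two steps at a
-- time (Python >> on Int is Lean's >>>).  Same fuel-only totality guard as in port A.
def loopBF : Nat → Int → Int → Int → Int
  | 0, _, _, r => r
  | f + 1, a, b, r =>
    if a = b then r else loopBF f (a >>> 1) (b >>> 1) (r + 2)

-- Python's int.bit_length is PySem.Int.bitLength; the batch lift  a >>= la - lb  is >>>.
def infinite_tree_alt (a : Int) (b : Int) : Int :=
  let la := PySem.Int.bitLength a
  let lb := PySem.Int.bitLength b
  if lb < la then loopBF (la + lb + 1) (a >>> (la - lb)) b ((la - lb : Nat) : Int)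
  else if la < lb then loopBF (la + lb + 1) a (b >>> (lb - la)) ((lb - la : Nat) : Int)
  else loopBF (la + lb + 1) a b 0

-- ===== PRECONDITION & SPEC =====
-- Pre_ excludes exactly the inputs on which Python A never returns: whenever a ≠ b and
-- either argument is negative, the negative side gets stuck at -1 and A's while loop
-- runs forever; A returns normally exactly on a = b or both arguments ≥ 0.
def Pre_infinite_tree (a : Int) (b : Int) : Prop := a = b ∨ (0 ≤ a ∧ 0 ≤ b)
instance (a : Int) (b : Int) : Decidable (Pre_infinite_tree a b) := by
  unfold Pre_infinite_tree; infer_instance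

def pvWitness_infinite_tree : Int × Int := (12, 5)

def Spec_infinite_tree (a : Int) (b : Int) (out : Int) : Prop := out = infinite_tree_alt a b
instance (a : Int) (b : Int) (out : Int) : Decidable (Spec_infinite_tree a b out) := by
  unfold Spec_infinite_tree; infer_instance

-- ===== CLAIM (what is proved, stated in full; the proofs are below) =====
def Claim_equal_infinite_tree : Prop :=
  ∀ (a : Int) (b : Int), Dom_infinite_tree a b → Pre_infinite_tree a b →
    Spec_infinite_tree a b (infinite_tree a b)

-- ===== LEMMAS AND PROOFS =====

-- Fuel-free Nat models of the two loops, used only by the proofs.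
def loopA (a b r : Nat) : Nat :=
  if a = b then r
  else if a > b then loopA (a / 2) b (r + 1)
  else loopA a (b / 2) (r + 1)
termination_by a + b
decreasing_by
  · have : a / 2 < a := Nat.div_lt_self (by omega) (by omega)
    omega
  · have hb : b > a := by omega
    have : b / 2 < b := Nat.div_lt_self (by omega) (by omega)
    omega

def loopB (a b r : Nat) : Nat :=
  if a = b then r else loopB (a / 2) (b / 2) (r + 2)
termination_by a + b
decreasing_by
  have h3 : b / 2 ≤ b := Nat.div_le_self b 2
  rcases Nat.eq_zero_or_pos a with ha | ha
  · have : b / 2 < b := Nat.div_lt_self (by omega) (by omega)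
    omega
  · have : a / 2 < a := Nat.div_lt_self ha (by omega)
    omega

-- size of the half: Python's  n // 2  drops exactly one bit of a nonzero n.
theorem size_div_two (a : Nat) (ha : a ≠ 0) : (a / 2).size = a.size - 1 := by
  have hs : 1 ≤ a.size := by
    rcases Nat.eq_zero_or_pos a.size with h | h
    · exact absurd (Nat.size_eq_zero.mp h) ha
    · exact h
  have hub : a < 2 ^ a.size := Nat.size_le.mp le_rfl
  apply Nat.le_antisymm
  · apply Nat.size_le.mpr
    have : (2:Nat) ^ a.size = 2 ^ (a.size - 1) * 2 := by
      rw [← pow_succ]; congr 1; omega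
    rw [this] at hub
    exact Nat.div_lt_of_lt_mul (by omega)
  · rcases Nat.lt_or_ge a.size 2 with h2 | h2
    · omega
    · have hlb : 2 ^ (a.size - 1) ≤ a := Nat.lt_size.mp (by omega)
      have : 2 ^ (a.size - 2) ≤ a / 2 := by
        apply Nat.le_div_iff_mul_le (by omega) |>.mpr
        have : (2:Nat) ^ (a.size - 2) * 2 = 2 ^ (a.size - 1) := by
          rw [← pow_succ]; congr 1; omega
        omega
      have := Nat.lt_size.mpr this
      omega

theorem size_div_le (a : Nat) : (a / 2).size ≤ a.size := by
  rcases Nat.eq_zero_or_pos a with h | h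
  · rw [h]
  · rw [size_div_two a (by omega)]; omega

theorem gt_of_size_lt {a b : Nat} (h : b.size < a.size) : b < a := by
  have h1 : b < 2 ^ b.size := Nat.size_le.mp le_rfl
  have h2 : 2 ^ b.size ≤ a := Nat.lt_size.mp h
  omega

theorem shiftRight_succ_comm (a d : Nat) : a >>> (d + 1) = (a / 2) >>> d := by
  rw [Nat.shiftRight_eq_div_pow, Nat.shiftRight_eq_div_pow, Nat.div_div_eq_div_mul,
    pow_succ, Nat.mul_comm]

theorem size_shiftRight_sub (d : Nat) : ∀ a : Nat, d ≤ a.size → (a >>> d).size = a.size - d := by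
  induction d with
  | zero => intro a _; simp
  | succ d ih =>
    intro a hd
    have ha : a ≠ 0 := by
      intro h; rw [h] at hd; simp [Nat.size_eq_zero.mpr rfl] at hd
    rw [shiftRight_succ_comm, ih (a / 2) (by rw [size_div_two a ha]; omega),
      size_div_two a ha]
    omega

-- batch alignment: lifting the deeper node d single steps equals one shift by d.
theorem loopA_align (d : Nat) : ∀ a b r : Nat, a.size = b.size + d →
    loopA a b r = loopA (a >>> d) b (r + d) := by
  induction d with
  | zero => intro a b r _; simp
  | succ d ih =>
    intro a b r h
    have ha : a ≠ 0 := by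
      intro h0; rw [h0] at h; simp [Nat.size_eq_zero.mpr rfl] at h
    have hab : b < a := gt_of_size_lt (by omega)
    rw [loopA, if_neg (by omega), if_pos (by omega),
      ih (a / 2) b (r + 1) (by rw [size_div_two a ha]; omega),
      shiftRight_succ_comm]
    congr 1
    omega

theorem loopA_symm : ∀ n a b r : Nat, a + b ≤ n → loopA a b r = loopA b a r := by
  intro n
  induction n with
  | zero =>
    intro a b r h
    have : a = 0 ∧ b = 0 := by omega
    rw [this.1, this.2]
  | succ n ih =>
    intro a b r h
    by_cases hab : a = b
    · rw [hab]
    · rcases Nat.lt_or_ge a b with hlt | hge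
      · have hb2 : b / 2 < b := Nat.div_lt_self (by omega) (by omega)
        rw [loopA, if_neg hab, if_neg (by omega)]
        conv_rhs => rw [loopA, if_neg (Ne.symm hab), if_pos hlt]
        exact ih a (b / 2) (r + 1) (by omega)
      · have hlt : b < a := by omega
        have ha2 : a / 2 < a := Nat.div_lt_self (by omega) (by omega)
        rw [loopA, if_neg hab, if_pos hlt]
        conv_rhs => rw [loopA, if_neg (Ne.symm hab), if_neg (by omega)]
        exact ih (a / 2) b (r + 1) (by omega)

-- once the two nodes are at equal depth, A's alternating single steps coincide with
-- B's simultaneous double steps.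
theorem loopA_eq_loopB : ∀ n a b r : Nat, a + b ≤ n → a.size = b.size →
    loopA a b r = loopB a b r := by
  intro n
  induction n with
  | zero =>
    intro a b r h _
    have : a = 0 ∧ b = 0 := by omega
    rw [this.1, this.2, loopA, loopB]; simp
  | succ n ih =>
    intro a b r h hsz
    by_cases hab : a = b
    · rw [hab, loopA, loopB]; simp
    · have ha : a ≠ 0 := by
        intro h0
        have : b = 0 := Nat.size_eq_zero.mp (by rw [← hsz, h0]; simp)
        exact hab (by omega)
      have hb : b ≠ 0 := by
        intro h0
        have : a = 0 := Nat.size_eq_zero.mp (by rw [hsz, h0]; simp)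
        exact ha this
      have has : 1 ≤ a.size := by
        rcases Nat.eq_zero_or_pos a.size with h | h
        · exact absurd (Nat.size_eq_zero.mp h) ha
        · exact h
      have hbs : 1 ≤ b.size := by
        rcases Nat.eq_zero_or_pos b.size with h | h
        · exact absurd (Nat.size_eq_zero.mp h) hb
        · exact h
      have key : loopA a b r = loopA (a / 2) (b / 2) (r + 2) := by
        rcases Nat.lt_or_ge a b with hlt | hge
        · have hsz2 : (b / 2).size < a.size := by rw [size_div_two b hb]; omega
          have h2 : b / 2 < a := gt_of_size_lt hsz2
          rw [loopA, if_neg hab, if_neg (by omega)]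
          rw [loopA, if_neg (by omega), if_pos h2]
        · have hlt : b < a := by omega
          have hsz2 : (a / 2).size < b.size := by rw [size_div_two a ha]; omega
          have h2 : a / 2 < b := gt_of_size_lt hsz2
          rw [loopA, if_neg hab, if_pos hlt]
          rw [loopA, if_neg (by omega), if_neg (by omega)]
      rw [key]
      have ha2 : a / 2 < a := Nat.div_lt_self (by omega) (by omega)
      have hb2 : b / 2 ≤ b := Nat.div_le_self b 2
      rw [ih (a / 2) (b / 2) (r + 2) (by omega)
        (by rw [size_div_two a ha, size_div_two b hb, hsz])]
      conv_rhs => rw [loopB, if_neg hab]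

-- the full correspondence on nonnegative (Nat) inputs
theorem loopA_eq_alt (na nb : Nat) :
    loopA na nb 0 =
      (if na.size > nb.size then loopB (na >>> (na.size - nb.size)) nb (na.size - nb.size)
       else if nb.size > na.size then loopB na (nb >>> (nb.size - na.size)) (nb.size - na.size)
       else loopB na nb 0) := by
  rcases Nat.lt_trichotomy na.size nb.size with h | h | h
  · rw [if_neg (by omega), if_pos h]
    set d := nb.size - na.size with hd
    have hsz : nb.size = na.size + d := by omega
    have hshift : (nb >>> d).size = na.size := by
      rw [size_shiftRight_sub d nb (by omega)]; omega
    rw [loopA_symm (na + nb) na nb 0 le_rfl, loopA_align d nb na 0 hsz,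
        loopA_symm ((nb >>> d) + na) (nb >>> d) na (0 + d) le_rfl]
    rw [loopA_eq_loopB (na + nb >>> d) na (nb >>> d) (0 + d) le_rfl hshift.symm]
    congr 1
    omega
  · rw [if_neg (by omega), if_neg (by omega)]
    exact loopA_eq_loopB (na + nb) na nb 0 le_rfl h
  · rw [if_pos h]
    set d := na.size - nb.size with hd
    have hsz : na.size = nb.size + d := by omega
    have hshift : (na >>> d).size = nb.size := by
      rw [size_shiftRight_sub d na (by omega)]; omega
    rw [loopA_align d na nb 0 hsz,
        loopA_eq_loopB (na >>> d + nb) (na >>> d) nb (0 + d) le_rfl hshift]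
    congr 1
    omega

-- PySem.Int.bitLength of a Nat cast is Nat.size
theorem bitLength_natCast_size : ∀ m : Nat, PySem.Int.bitLength (m : Int) = m.size := by
  intro m
  induction m using Nat.strong_induction_on with
  | _ m ih =>
    rcases Nat.eq_zero_or_pos m with h | h
    · rw [h]; simp [PySem.Int.bitLength_zero]
    · have h2 : m / 2 < m := Nat.div_lt_self h (by omega)
      rw [PySem.Int.bitLength_natCast h, ih (m / 2) h2, size_div_two m (by omega)]
      have hs : 1 ≤ m.size := by
        rcases Nat.eq_zero_or_pos m.size with hh | hh
        · exact absurd (Nat.size_eq_zero.mp hh) (by omega)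
        · exact hh
      omega

theorem floordiv_two_natCast (m : Nat) :
    PySem.Int.floordiv (m : Int) 2 = ((m / 2 : Nat) : Int) := by
  exact_mod_cast PySem.Int.floordiv_natCast m 2

-- fuel adequacy + Nat bridge for port A's loop
theorem loopAF_bridge : ∀ f na nb nr : Nat, na.size + nb.size ≤ f →
    loopAF f (na : Int) (nb : Int) (nr : Int) = ((loopA na nb nr : Nat) : Int) := by
  intro f
  induction f with
  | zero =>
    intro na nb nr h
    have hna : na = 0 := Nat.size_eq_zero.mp (by omega)
    have hnb : nb = 0 := Nat.size_eq_zero.mp (by omega)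
    rw [hna, hnb, loopAF, loopA]
    simp
  | succ f ih =>
    intro na nb nr h
    by_cases hab : na = nb
    · rw [hab, loopAF, loopA]
      simp
    · rw [loopAF, if_neg (by exact_mod_cast hab)]
      have hcast : (nr : Int) + 1 = ((nr + 1 : Nat) : Int) := by push_cast; ring
      rcases Nat.lt_or_ge nb na with hlt | hge
      · have hna : na ≠ 0 := by omega
        have hs : 1 ≤ na.size := by
          rcases Nat.eq_zero_or_pos na.size with hh | hh
          · exact absurd (Nat.size_eq_zero.mp hh) hna
          · exact hh
        have hfuel : (na / 2).size + nb.size ≤ f := by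
          rw [size_div_two na hna]; omega
        rw [if_pos (by exact_mod_cast hlt), floordiv_two_natCast, hcast,
          ih (na / 2) nb (nr + 1) hfuel]
        conv_rhs => rw [loopA, if_neg hab, if_pos hlt]
      · have hnb : nb ≠ 0 := by omega
        have hs : 1 ≤ nb.size := by
          rcases Nat.eq_zero_or_pos nb.size with hh | hh
          · exact absurd (Nat.size_eq_zero.mp hh) hnb
          · exact hh
        have hfuel : na.size + (nb / 2).size ≤ f := by
          rw [size_div_two nb hnb]; omega
        have hnlt : ¬ ((nb : Int) < (na : Int)) := by
          rw [not_lt]; exact_mod_cast hge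
        rw [if_neg hnlt, floordiv_two_natCast, hcast, ih na (nb / 2) (nr + 1) hfuel]
        conv_rhs => rw [loopA, if_neg hab, if_neg (by omega)]

-- fuel adequacy + Nat bridge for port B's loop
theorem loopBF_bridge : ∀ f na nb nr : Nat, na.size + nb.size ≤ f →
    loopBF f (na : Int) (nb : Int) (nr : Int) = ((loopB na nb nr : Nat) : Int) := by
  intro f
  induction f with
  | zero =>
    intro na nb nr h
    have hna : na = 0 := Nat.size_eq_zero.mp (by omega)
    have hnb : nb = 0 := Nat.size_eq_zero.mp (by omega)
    rw [hna, hnb, loopBF, loopB]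
    simp
  | succ f ih =>
    intro na nb nr h
    by_cases hab : na = nb
    · rw [hab, loopBF, loopB]
      simp
    · rw [loopBF, if_neg (by exact_mod_cast hab)]
      have hsh : ∀ m : Nat, ((m : Int) >>> 1) = ((m / 2 : Nat) : Int) := by
        intro m
        rw [show ((m : Int) >>> 1) = ((m >>> 1 : Nat) : Int) from by exact_mod_cast rfl,
          Nat.shiftRight_one]
      have hpos : na ≠ 0 ∨ nb ≠ 0 := by omega
      have hfuel : (na / 2).size + (nb / 2).size ≤ f := by
        have h1 := size_div_le na
        have h2 := size_div_le nb
        rcases hpos with hna | hnb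
        · have := size_div_two na hna
          have hs : 1 ≤ na.size := by
            rcases Nat.eq_zero_or_pos na.size with hh | hh
            · exact absurd (Nat.size_eq_zero.mp hh) hna
            · exact hh
          omega
        · have := size_div_two nb hnb
          have hs : 1 ≤ nb.size := by
            rcases Nat.eq_zero_or_pos nb.size with hh | hh
            · exact absurd (Nat.size_eq_zero.mp hh) hnb
            · exact hh
          omega
      rw [hsh na, hsh nb]
      have : (nr : Int) + 2 = ((nr + 2 : Nat) : Int) := by push_cast; ring
      rw [this, ih (na / 2) (nb / 2) (nr + 2) hfuel]
      conv_rhs => rw [loopB, if_neg hab]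

-- positive fuel on equal arguments returns immediately
theorem loopAF_eq_self (f : Nat) (hf : f ≠ 0) (a r : Int) : loopAF f a a r = r := by
  cases f with
  | zero => omega
  | succ f => rw [loopAF]; simp

theorem loopBF_eq_self (f : Nat) (hf : f ≠ 0) (a r : Int) : loopBF f a a r = r := by
  cases f with
  | zero => omega
  | succ f => rw [loopBF]; simp

theorem shiftRight_natCast (m d : Nat) : ((m : Int) >>> d) = ((m >>> d : Nat) : Int) := by
  exact_mod_cast rfl

-- ===== VERDICT (by name: the statement is the Claim_ definition above) =====
theorem infinite_tree_spec : Claim_equal_infinite_tree := by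
  intro a b _ hpre
  unfold Spec_infinite_tree infinite_tree infinite_tree_alt
  rcases hpre with heq | ⟨ha, hb⟩
  · subst heq
    rw [loopAF_eq_self _ (by omega) a 0]
    simp only [lt_irrefl, if_false]
    rw [loopBF_eq_self _ (by omega) a 0]
  · obtain ⟨na, rfl⟩ : ∃ na : Nat, a = (na : Int) := ⟨a.toNat, (Int.toNat_of_nonneg ha).symm⟩
    obtain ⟨nb, rfl⟩ : ∃ nb : Nat, b = (nb : Int) := ⟨b.toNat, (Int.toNat_of_nonneg hb).symm⟩
    simp only [bitLength_natCast_size]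
    rw [show ((0:Int)) = ((0 : Nat) : Int) from rfl]
    rw [loopAF_bridge (na.size + nb.size + 1) na nb 0 (by omega)]
    rcases Nat.lt_trichotomy na.size nb.size with h | h | h
    · rw [if_neg (by omega), if_pos h, shiftRight_natCast]
      have hfuel : na.size + (nb >>> (nb.size - na.size)).size ≤ na.size + nb.size + 1 := by
        rw [size_shiftRight_sub _ nb (by omega)]; omega
      rw [show (((nb.size - na.size : Nat)) : Int) = (((nb.size - na.size : Nat) : Nat) : Int) from rfl,
        loopBF_bridge (na.size + nb.size + 1) na (nb >>> (nb.size - na.size)) (nb.size - na.size) hfuel]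
      rw [loopA_eq_alt na nb, if_neg (by omega), if_pos h]
    · rw [if_neg (by omega), if_neg (by omega)]
      rw [loopBF_bridge (na.size + nb.size + 1) na nb 0 (by omega)]
      rw [loopA_eq_alt na nb, if_neg (by omega), if_neg (by omega)]
    · rw [if_pos h, shiftRight_natCast]
      have hfuel : (na >>> (na.size - nb.size)).size + nb.size ≤ na.size + nb.size + 1 := by
        rw [size_shiftRight_sub _ na (by omega)]; omega
      rw [show (((na.size - nb.size : Nat)) : Int) = (((na.size - nb.size : Nat) : Nat) : Int) from rfl,
        loopBF_bridge (na.size + nb.size + 1) (na >>> (na.size - nb.size)) nb (na.size - nb.size) hfuel]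
      rw [loopA_eq_alt na nb, if_pos h]
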